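-- pv_equiv track=rewrite | github.com/dmlc/gluon-cv | gluoncv/utils/viz/segmentation.py | _getvocpallete
-- ===== SOURCE A (Python) =====
-- def _getvocpallete(num_cls):
--     n = num_cls
--     pallete = [0]*(n*3)
--     for j in range(0, n):
--         lab = j
--         pallete[j*3+0] = 0
--         pallete[j*3+1] = 0
--         pallete[j*3+2] = 0
--         i = 0
--         while (lab > 0):
--             pallete[j*3+0] |= (((lab >> 0) & 1) << (7-i))
--             pallete[j*3+1] |= (((lab >> 1) & 1) << (7-i))
--             pallete[j*3+2] |= (((lab >> 2) & 1) << (7-i))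
--             i = i + 1
--             lab >>= 3
--     return pallete
-- ===== SOURCE B (Python) =====
-- def _getvocpallete(num_cls):
--     def chan(j, c):
--         # bit-plane value built recursively: top bit from j's bit c,
--         # the rest is the channel value of j >> 3 shifted one place down
--         if j == 0:
--             return 0
--         return (((j >> c) & 1) << 7) | (chan(j >> 3, c) >> 1)
--
--     out = []
--     for j in range(max(num_cls, 0)):
--         out += [chan(j, 0), chan(j, 1), chan(j, 2)]
--     return out
-- ===== Notes on version B (the rewrite author's own statement) =====
-- stated objective: alternative
-- what changed: Replaces A's in-place palette array with positional bit-deposit inner loop (index i, OR into pallete[j*3+k]) by a per-channel recursive function on j>>3 that builds each byte as (bit<<7) | (recursive value >> 1), appending each triple to the output list; Pre_ excludes num_cls > 2**24, where A raises ValueError (negative shift count).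
import Mathlib
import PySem

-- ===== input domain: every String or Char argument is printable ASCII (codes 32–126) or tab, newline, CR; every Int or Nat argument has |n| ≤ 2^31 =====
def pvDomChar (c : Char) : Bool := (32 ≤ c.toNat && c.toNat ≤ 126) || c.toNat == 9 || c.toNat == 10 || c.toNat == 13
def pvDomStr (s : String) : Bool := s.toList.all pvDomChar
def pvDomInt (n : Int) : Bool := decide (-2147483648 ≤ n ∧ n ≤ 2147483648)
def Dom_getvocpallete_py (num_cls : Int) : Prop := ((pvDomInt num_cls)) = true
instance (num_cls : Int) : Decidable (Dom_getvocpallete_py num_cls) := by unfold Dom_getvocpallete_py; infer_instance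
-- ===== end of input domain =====

-- B replaces A's positional bit-deposit loop (index i, OR into a preallocated list) by a
-- per-channel recursion on j >> 3 that builds each byte by shifting the recursive value down
-- (objective: alternative decomposition, same cost).

-- ===== PORT A =====
-- A's inner `while lab > 0` loop. The three `pallete[j*3+k] = 0` initialisations are the
-- zero accumulators; the loop ORs into them. `7 - i` is Nat subtraction, which clamps at 0
-- where Python raises ValueError (negative shift, i > 7) — those inputs are outside Pre_.
def pvAWhile (lab i r g b : Nat) : Nat × Nat × Nat :=
  if lab > 0 then
    pvAWhile (lab >>> 3) (i + 1)
      (r ||| (((lab >>> 0) &&& 1) <<< (7 - i)))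
      (g ||| (((lab >>> 1) &&& 1) <<< (7 - i)))
      (b ||| (((lab >>> 2) &&& 1) <<< (7 - i)))
  else (r, g, b)
termination_by lab
decreasing_by simp [Nat.shiftRight_eq_div_pow]; omega

-- one body of A's `for j in range(0, n)` loop: store the triple at positions j*3, j*3+1, j*3+2
def pvAStep (p : List Int) (j : Int) : List Int :=
  let t := pvAWhile j.toNat 0 0 0 0
  ((p.set (j * 3).toNat (t.1 : Int)).set (j * 3 + 1).toNat (t.2.1 : Int)).set
    (j * 3 + 2).toNat (t.2.2 : Int)

def getvocpallete_py (num_cls : Int) : List Int :=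
  (PySem.List.pyRange 0 num_cls 1).foldl pvAStep (List.replicate (num_cls * 3).toNat 0)

-- ===== PORT B =====
-- Source B's `chan(j, c)`
def pvChan (j c : Nat) : Nat :=
  if j = 0 then 0
  else (((j >>> c) &&& 1) <<< 7) ||| (pvChan (j >>> 3) c >>> 1)
termination_by j
decreasing_by simp [Nat.shiftRight_eq_div_pow]; omega

-- Source B's `out += [chan(j,0), chan(j,1), chan(j,2)]` per j of range(max(num_cls, 0))
def pvEnt (j : Nat) : List Int := [(pvChan j 0 : Int), (pvChan j 1 : Int), (pvChan j 2 : Int)]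

def getvocpallete_py_alt (num_cls : Int) : List Int :=
  (List.range (max num_cls 0).toNat).flatMap pvEnt

-- ===== PRECONDITION & SPEC =====
-- For num_cls > 2^24 some j ≥ 2^24 needs a 9th loop round, where Python shifts by 7-8 < 0 and
-- raises ValueError; Pre_ excludes exactly those inputs (A returns normally iff num_cls ≤ 2^24).
def Pre_getvocpallete_py (num_cls : Int) : Prop := num_cls ≤ 16777216
instance (num_cls : Int) : Decidable (Pre_getvocpallete_py num_cls) := by
  unfold Pre_getvocpallete_py; infer_instance
def pvWitness_getvocpallete_py : Int := (21)
def Spec_getvocpallete_py (num_cls : Int) (out : List Int) : Prop := out = getvocpallete_py_alt num_cls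
instance (num_cls : Int) (out : List Int) : Decidable (Spec_getvocpallete_py num_cls out) := by
  unfold Spec_getvocpallete_py; infer_instance

-- ===== CLAIM (what is proved, stated in full; the proofs are below) =====
def Claim_equal_getvocpallete_py : Prop := ∀ (num_cls : Int), Dom_getvocpallete_py num_cls → Pre_getvocpallete_py num_cls → Spec_getvocpallete_py num_cls (getvocpallete_py num_cls)

-- ===== LEMMAS AND PROOFS =====

theorem pv_or_shiftRight (a b i : Nat) : (a ||| b) >>> i = (a >>> i) ||| (b >>> i) := by
  apply Nat.eq_of_testBit_eq; intro k
  simp [Nat.testBit_shiftRight, Nat.testBit_or]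

theorem pv_shiftLeft7_shiftRight (x i : Nat) (h : i ≤ 7) :
    (x <<< 7) >>> i = x <<< (7 - i) := by
  apply Nat.eq_of_testBit_eq; intro k
  simp [Nat.testBit_shiftRight, Nat.testBit_shiftLeft]
  rw [Nat.add_comm i k, show k + i - 7 = k - (7 - i) from by omega]

-- the inner while-loop computes, channel by channel, pvChan shifted down by the start index i
theorem pvAWhile_eq_chan (lab : Nat) : ∀ i r g b, i ≤ 8 → lab < 8 ^ (8 - i) →
    pvAWhile lab i r g b =
      (r ||| (pvChan lab 0 >>> i), g ||| (pvChan lab 1 >>> i), b ||| (pvChan lab 2 >>> i)) := by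
  induction lab using Nat.strong_induction_on with
  | _ lab ih =>
    intro i r g b hi hlt
    by_cases h0 : lab = 0
    · subst h0; rw [pvAWhile]; simp [pvChan]
    · have hpos : 0 < lab := Nat.pos_of_ne_zero h0
      have hi7 : i ≤ 7 := by
        by_contra hc
        have : i = 8 := by omega
        subst this; simp at hlt; omega
      have hdiv : lab >>> 3 < lab := by
        simp [Nat.shiftRight_eq_div_pow]; omega
      have hbound : lab >>> 3 < 8 ^ (8 - (i + 1)) := by
        rw [Nat.shiftRight_eq_div_pow]
        have : (8:Nat) ^ (8 - i) = 8 ^ (8 - (i+1)) * 8 := by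
          rw [← pow_succ]; congr 1; omega
        rw [Nat.div_lt_iff_lt_mul (by norm_num : (0:Nat) < 2^3)]
        have h8 : (8:Nat) ^ (8 - i) = 8 ^ (8 - (i+1)) * 2 ^ 3 := by rw [this]; norm_num
        omega
      rw [pvAWhile]
      simp only [hpos, if_pos]
      rw [ih (lab >>> 3) hdiv (i + 1) _ _ _ (by omega) hbound]
      have hchan : ∀ c : Nat, pvChan lab c >>> i =
          ((((lab >>> c) &&& 1) <<< (7 - i)) ||| (pvChan (lab >>> 3) c >>> (i + 1))) := by
        intro c
        conv_lhs => rw [pvChan]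
        simp only [h0, ite_false]
        rw [pv_or_shiftRight, pv_shiftLeft7_shiftRight _ _ hi7,
            ← Nat.shiftRight_add, Nat.add_comm 1 i]
      rw [hchan 0, hchan 1, hchan 2]
      simp only [Nat.shiftRight_zero, Nat.or_assoc]

theorem pvAStep_length (p : List Int) (j : Int) : (pvAStep p j).length = p.length := by
  simp [pvAStep]

-- the fold never touches a tail appended beyond the indices it writes
theorem pv_foldA_append (l : List Int) (q : List Int) : ∀ p : List Int,
    (∀ j ∈ l, 0 ≤ j ∧ (j * 3 + 2).toNat < p.length) →
    l.foldl pvAStep (p ++ q) = (l.foldl pvAStep p) ++ q := by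
  induction l with
  | nil => intro p _; simp
  | cons j t ih =>
    intro p hp
    have hj := hp j (by simp)
    have h0 : (j * 3).toNat < p.length := by omega
    have h1 : (j * 3 + 1).toNat < p.length := by omega
    have h2 : (j * 3 + 2).toNat < p.length := by omega
    have hstep : pvAStep (p ++ q) j = pvAStep p j ++ q := by
      simp only [pvAStep]
      rw [List.set_append_left _ _ h0, List.set_append_left _ _ (by simpa using h1),
          List.set_append_left _ _ (by simpa using h2)]
    simp only [List.foldl_cons, hstep]
    exact ih _ (fun x hx => by
      have := hp x (by simp [hx])
      simpa [pvAStep_length] using this)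

theorem pvEnt_flatMap_length (m : Nat) : ((List.range m).flatMap pvEnt).length = m * 3 := by
  induction m with
  | zero => simp
  | succ m ih => rw [List.range_succ]; simp [ih, pvEnt]; omega

-- main loop correspondence on natural sizes
theorem pv_main (m : Nat) (hm : m ≤ 16777216) :
    (List.map (fun k : Nat => (k : Int)) (List.range m)).foldl pvAStep (List.replicate (m * 3) 0) =
      (List.range m).flatMap pvEnt := by
  induction m with
  | zero => simp
  | succ m ih =>
    have hm' : m ≤ 16777216 := by omega
    rw [List.range_succ, List.map_append, List.foldl_append,
        show (m + 1) * 3 = m * 3 + 3 from by ring, List.replicate_add]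
    rw [pv_foldA_append _ _ _ (by
      intro j hj
      simp only [List.mem_map, List.mem_range] at hj
      obtain ⟨k, hk, rfl⟩ := hj
      constructor
      · positivity
      · simp [List.length_replicate]
        omega)]
    rw [ih hm']
    set F := (List.range m).flatMap pvEnt with hF
    have hFlen : F.length = m * 3 := pvEnt_flatMap_length m
    have h8 : m < 8 ^ (8 - 0) := by
      have : (8:Nat) ^ (8 - 0) = 16777216 := by norm_num
      omega
    have hw : pvAWhile m 0 0 0 0 = (pvChan m 0, pvChan m 1, pvChan m 2) := by
      rw [pvAWhile_eq_chan m 0 0 0 0 (by omega) h8]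
      simp
    simp only [List.map_cons, List.map_nil, List.foldl_cons, List.foldl_nil, pvAStep, Int.toNat_natCast, hw]
    have e0 : ((m : Int) * 3).toNat = F.length + 0 := by omega
    have e1 : ((m : Int) * 3 + 1).toNat = F.length + 1 := by omega
    have e2 : ((m : Int) * 3 + 2).toNat = F.length + 2 := by omega
    rw [e0, e1, e2]
    rw [List.set_append_right _ _ (by omega)]
    simp only [Nat.add_sub_cancel_left]
    rw [List.set_append_right _ _ (by omega)]
    simp only [Nat.add_sub_cancel_left]
    rw [List.set_append_right _ _ (by omega)]
    simp only [Nat.add_sub_cancel_left]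
    rw [List.flatMap_append]
    simp [pvEnt, List.replicate]
    exact hF

-- ===== VERDICT (by name: the statement is the Claim_ definition above) =====
theorem getvocpallete_py_spec : Claim_equal_getvocpallete_py := by
  intro n _ hpre
  unfold Spec_getvocpallete_py getvocpallete_py getvocpallete_py_alt
  by_cases hn : n ≤ 0
  · have h1 : PySem.List.pyRange 0 n 1 = [] := by
      simp [PySem.List.pyRange]; omega
    have h2 : (n * 3).toNat = 0 := by omega
    have h3 : (max n 0).toNat = 0 := by omega
    simp [h1, h2, h3]
  · rw [Int.not_le] at hn
    have hcast : n = ((n.toNat : Nat) : Int) := by omega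
    have hrange : PySem.List.pyRange 0 n 1 = List.map (fun k : Nat => (k : Int)) (List.range n.toNat) := by
      rw [hcast]; exact PySem.List.pyRange_zero_natCast n.toNat
    have h2 : (n * 3).toNat = n.toNat * 3 := by omega
    have h3 : (max n 0).toNat = n.toNat := by omega
    rw [hrange, h2, h3]
    exact pv_main n.toNat (by unfold Pre_getvocpallete_py at hpre; omega)
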